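-- pv_equiv track=rewrite | github.com/clay-good/codelicious | src/codelicious/parser.py | _heading_level
-- ===== SOURCE A (Python) =====
-- def _heading_level(line: str) -> int:
--     """Return the heading level (1-6) if the line is a markdown heading, else 0."""
--     stripped = line.lstrip()
--     if not stripped.startswith("#"):
--         return 0
--
--     hashes = 0
--     for ch in stripped:
--         if ch == "#":
--             hashes += 1
--         else:
--             break
--
--     # The character after all hashes must be a space (or end-of-line) to be valid
--     if len(stripped) <= hashes:
--         # Line is only hashes with no space/text after
--         return 0
--     if stripped[hashes] != " ":
--         return 0
--
--     # Cap heading depth at 6 (levels beyond 6 are not standard markdown)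
--     return min(hashes, 6)
-- ===== SOURCE B (Python) =====
-- def _heading_level(line: str) -> int:
--     """Return the heading level (1-6) if the line is a markdown heading, else 0."""
--     stripped = line.lstrip()
--     i = stripped.find(" ")
--     if i == -1:
--         return 0
--     if stripped[:i] != "#" * i:
--         return 0
--     return min(i, 6)
-- ===== Notes on version B (the rewrite author's own statement) =====
-- stated objective: idiomatic
-- what changed: Replaces A's two-phase count-hashes-then-validate character loop with a boundary split: find the first space, then compare the prefix before it against a same-length run of hash characters.
import Mathlib
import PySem

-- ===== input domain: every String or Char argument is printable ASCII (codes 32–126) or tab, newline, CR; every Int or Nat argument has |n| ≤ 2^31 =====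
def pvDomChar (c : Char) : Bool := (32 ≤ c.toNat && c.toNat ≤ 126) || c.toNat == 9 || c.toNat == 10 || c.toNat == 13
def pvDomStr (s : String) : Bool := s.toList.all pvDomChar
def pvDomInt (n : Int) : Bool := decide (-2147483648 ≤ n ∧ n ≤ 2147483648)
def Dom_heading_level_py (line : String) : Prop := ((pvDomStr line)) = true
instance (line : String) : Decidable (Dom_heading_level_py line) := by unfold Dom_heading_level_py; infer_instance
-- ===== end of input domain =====

-- B replaces A's count-then-validate hash loop with a find-first-space boundary split
-- and a prefix comparison against a same-length run of hashes (idiomatic; same cost).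

-- ===== PORT A =====
-- the 'for ch in stripped: if ch == "#": hashes += 1 else: break' loop
def pvCountHashes : List Char → Int
  | [] => 0
  | c :: cs => if c = '#' then 1 + pvCountHashes cs else 0

def heading_level_py (line : String) : Int :=
  let stripped := PySem.Str.lstrip line
  if !(PySem.Str.startswith stripped "#") then 0
  else
    let hashes : Int := pvCountHashes stripped.toList
    if PySem.Str.len stripped ≤ hashes then 0
    else if PySem.Str.pyGet? stripped hashes ≠ some ' ' then 0
    else min hashes 6

-- ===== PORT B =====
def heading_level_py_alt (line : String) : Int :=
  let stripped := PySem.Str.lstrip line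
  let i := PySem.Str.find stripped " "
  if i = -1 then 0
  else if PySem.Str.slice stripped none (some i) ≠ String.ofList (List.replicate i.toNat '#') then 0
  else min i 6

-- ===== PRECONDITION & SPEC =====
def Spec_heading_level_py (line : String) (out : Int) : Prop := out = heading_level_py_alt line
instance (line : String) (out : Int) : Decidable (Spec_heading_level_py line out) := by unfold Spec_heading_level_py; infer_instance

-- ===== CLAIM (what is proved, stated in full; the proofs are below) =====
def Claim_equal_heading_level_py : Prop := ∀ (line : String), Dom_heading_level_py line → Spec_heading_level_py line (heading_level_py line)

-- ===== LEMMAS AND PROOFS =====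

lemma cnt_spec (l : List Char) :
    ∃ (k : Nat) (rest : List Char), pvCountHashes l = (k : Int) ∧ l = List.replicate k '#' ++ rest ∧
      ∀ c, rest.head? = some c → c ≠ '#' := by
  induction l with
  | nil => exact ⟨0, [], rfl, rfl, by simp⟩
  | cons c cs ih =>
    by_cases hc : c = '#'
    · obtain ⟨k, rest, h1, h2, h3⟩ := ih
      refine ⟨k + 1, rest, ?_, ?_, h3⟩
      · simp [pvCountHashes, hc, h1]; ring
      · subst hc h2; simp [List.replicate_succ]
    · exact ⟨0, c :: cs, by simp [pvCountHashes, hc], rfl, by simpa using hc⟩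

lemma pref_single {c : Char} {t : List Char} : [c] <+: t ↔ t.head? = some c := by
  constructor
  · rintro ⟨u, rfl⟩; rfl
  · cases t with
    | nil => simp
    | cons a t => intro h; simp at h; exact ⟨t, by simp [h]⟩

lemma core (l : List Char) :
    (if !(PySem.Chars.startswith l ['#']) then (0 : Int)
     else if (l.length : Int) ≤ pvCountHashes l then 0
     else if PySem.List.pyGet? l (pvCountHashes l) ≠ some ' ' then 0
     else min (pvCountHashes l) 6)
    = (if PySem.Chars.find l [' '] = -1 then (0 : Int)
       else if PySem.List.slice l none (some (PySem.Chars.find l [' '])) ≠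
             List.replicate (PySem.Chars.find l [' ']).toNat '#' then 0
       else min (PySem.Chars.find l [' ']) 6) := by
  obtain ⟨k, rest, hcnt, hl, hrest⟩ := cnt_spec l
  have hfind := PySem.Chars.find_eq_neg_one_iff (s := l) (sub := [' '])
  cases rest with
  | nil =>
    -- l is only hashes: A returns 0 (startswith fails or no char after); B: no space found
    have hnosp : PySem.Chars.find l [' '] = -1 := by
      rw [hfind]; intro h
      have : ' ' ∈ l := h.sublist.subset (by simp)
      rw [hl] at this; simp at this
    rw [hnosp]
    rw [if_pos rfl]
    rcases Nat.eq_zero_or_pos k with hk | hk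
    · subst hk; simp at hl; subst hl
      have : PySem.Chars.startswith ([] : List Char) ['#'] = false := by decide
      simp [this]
    · have hsw : PySem.Chars.startswith l ['#'] = true := by
        rw [PySem.Chars.startswith_iff, pref_single, hl]
        cases k with
        | zero => omega
        | succ k => simp [List.replicate_succ]
      have hlen : l.length = k := by simp [hl]
      rw [hcnt, hsw]
      simp [hlen]
  | cons c rs =>
    have hc : c ≠ '#' := hrest c rfl
    have hgetk : l[k]? = some c := by
      rw [hl, List.getElem?_append_right (by simp)]; simp
    have hget_lt : ∀ j, j < k → l[j]? = some '#' := by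
      intro j hj
      rw [hl, List.getElem?_append_left (by simpa using hj)]
      simp [hj]
    have hlen : l.length = k + 1 + rs.length := by simp [hl]; omega
    by_cases hsp : c = ' '
    · -- valid heading shape after the hashes (if k ≥ 1)
      subst hsp
      have hpre : [' '] <+: l.drop k := by
        rw [pref_single, List.head?_drop, hgetk]
      have hne : PySem.Chars.find l [' '] ≠ -1 := by
        rw [Ne, hfind]
        exact not_not_intro (List.infix_iff_prefix_suffix.mpr ⟨_, hpre, List.drop_suffix _ _⟩)
      have hge : 0 ≤ PySem.Chars.find l [' '] := by
        have := PySem.Chars.neg_one_le_find (s := l) (sub := [' '])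
        omega
      obtain ⟨hp, hmin⟩ := PySem.Chars.find_spec (s := l) (sub := [' ']) hge
      have hm : (PySem.Chars.find l [' ']).toNat = k := by
        set m := (PySem.Chars.find l [' ']).toNat with hmdef
        rcases lt_trichotomy m k with h | h | h
        · exfalso
          rw [pref_single, List.head?_drop, hget_lt m h] at hp
          simp at hp
        · exact h
        · exact absurd hpre (hmin k h)
      have hfk : PySem.Chars.find l [' '] = (k : Int) := by omega
      rw [hfk]
      have htake : PySem.List.slice l none (some ((k : Nat) : Int)) = List.replicate k '#' := by
        rw [PySem.List.slice_to_natCast, hl, List.take_left']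
        simp
      simp only [Int.toNat_natCast, htake, ne_eq, not_true_eq_false, if_false, if_neg (by omega : ¬ ((k:Int) = -1))]
      rcases Nat.eq_zero_or_pos k with hk | hk
      · subst hk; simp at hl; subst hl
        have : PySem.Chars.startswith (' ' :: rs) ['#'] = false := by
          rw [← Bool.not_eq_true, PySem.Chars.startswith_iff, pref_single]; simp
        rw [this]
        simp
      · have hsw : PySem.Chars.startswith l ['#'] = true := by
          rw [PySem.Chars.startswith_iff, pref_single, hl]
          cases k with
          | zero => omega
          | succ k => simp [List.replicate_succ]
        have hget : PySem.List.pyGet? l ((k : Nat) : Int) = some ' ' := by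
          rw [PySem.List.pyGet?_natCast, hgetk]
        rw [hcnt, hsw]
        rw [if_neg (by simp), if_neg (by omega : ¬ ((l.length : Int) ≤ (k : Int))), if_neg (by simp [hget])]
      -- (lengths: l.length = k + 1 + rs.length > k)
    · -- character after the hashes is not a space: both sides give 0
      have hA : (if !(PySem.Chars.startswith l ['#']) then (0 : Int)
          else if (l.length : Int) ≤ pvCountHashes l then 0
          else if PySem.List.pyGet? l (pvCountHashes l) ≠ some ' ' then 0
          else min (pvCountHashes l) 6) = 0 := by
        rcases Nat.eq_zero_or_pos k with hk | hk
        · subst hk; simp at hl; subst hl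
          have : PySem.Chars.startswith (c :: rs) ['#'] = false := by
            rw [← Bool.not_eq_true, PySem.Chars.startswith_iff, pref_single]; simp [hc]
          simp [this]
        · have hsw : PySem.Chars.startswith l ['#'] = true := by
            rw [PySem.Chars.startswith_iff, pref_single, hl]
            cases k with
            | zero => omega
            | succ k => simp [List.replicate_succ]
          have hget : PySem.List.pyGet? l (pvCountHashes l) = some c := by
            rw [hcnt, PySem.List.pyGet?_natCast, hgetk]
          rw [hsw, hcnt]
          have hget' : PySem.List.pyGet? l ((k : Nat) : Int) = some c := by
            rw [PySem.List.pyGet?_natCast, hgetk]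
          rw [if_neg (by simp), if_neg (by omega : ¬ ((l.length : Int) ≤ (k : Int))), if_pos (by simp [hget', hsp])]
      rw [hA]
      by_cases hf : PySem.Chars.find l [' '] = -1
      · rw [hf]; simp
      · have hge : 0 ≤ PySem.Chars.find l [' '] := by
          have := PySem.Chars.neg_one_le_find (s := l) (sub := [' '])
          omega
        obtain ⟨hp, hmin⟩ := PySem.Chars.find_spec (s := l) (sub := [' ']) hge
        set m := (PySem.Chars.find l [' ']).toNat with hmdef
        have hgetm : l[m]? = some ' ' := by
          rw [← List.head?_drop, ← pref_single]; exact hp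
        rw [if_neg hf, if_pos]
        rw [PySem.List.slice_to l hge, ← hmdef]
        intro heq
        rcases lt_trichotomy m k with h | h | h
        · rw [hget_lt m h] at hgetm; simp at hgetm
        · rw [h] at hgetm; rw [hgetk] at hgetm
          exact hsp (by simpa using hgetm)
        · -- m > k: the k-th element of take m l is c, but replicate gives '#'
          have h1 : (l.take m)[k]? = some c := by
            rw [List.getElem?_take_of_lt h, hgetk]
          rw [heq] at h1
          have h2 : (List.replicate m '#')[k]? = some '#' := by
            simp [h]
          rw [h2] at h1
          exact hc (by simpa using h1.symm)

-- ===== VERDICT (by name: the statement is the Claim_ definition above) =====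
theorem heading_level_py_spec : Claim_equal_heading_level_py := by
  intro line _
  unfold Spec_heading_level_py heading_level_py heading_level_py_alt
  have hb : ∀ (s : String) (i : Int),
      (PySem.Str.slice s none (some i) = String.ofList (List.replicate i.toNat '#')) ↔
      (PySem.List.slice s.toList none (some i) = List.replicate i.toNat '#') := by
    intro s i
    rw [String.ext_iff, PySem.Str.toList_slice, PySem.Chars.slice_eq_listSlice]
    simp
  simp only [PySem.Str.startswith_eq, PySem.Str.len_eq, PySem.Str.pyGet?_eq,
    PySem.Str.find_eq, PySem.Chars.pyGet?_eq_listPyGet?, ne_eq, hb]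
  have h1 : "#".toList = ['#'] := by decide
  have h2 : " ".toList = [' '] := by decide
  rw [h1, h2]
  simpa using core (PySem.Str.lstrip line).toList
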